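-- pv_equiv track=rewrite | github.com/CSStudySession/AlgoInPython | Pins/Pins multiplication of large integers.py | multiply_single_digit
-- ===== SOURCE A (Python) =====
-- from typing import List
--
-- def multiply_single_digit(digits: List[int], digit: int) -> List[int]:
--     if digits == [0] or digit == 0:
--         return [0]
--     carry = 0
--     result = []
--     n = len(digits)
--     idx = n - 1
--     # 从低位到高位（逆序处理）
--     while idx >= 0:
--         prod = digits[idx] * digit + carry
--         result.append(prod % 10)
--         carry = prod // 10
--         idx -= 1
--     if carry:
--         result.append(carry)
--     result.reverse() # 此时 result 是低位在前的，需要翻转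
--     return result
-- ===== SOURCE B (Python) =====
-- def multiply_single_digit(digits, digit):
--     if digits == [0] or digit == 0:
--         return [0]
--     n = len(digits)
--     val = 0
--     for d in digits:
--         val = val * 10 + d
--     total = val * digit
--
--     def rec(t, m):
--         # big-endian list of the m lowest base-10 digits of t (floor semantics)
--         if m == 0:
--             return []
--         if m == 1:
--             return [t % 10]
--         h = m // 2
--         p = 10 ** h
--         return rec(t // p, m - h) + rec(t % p, h)
--
--     carry = total // 10 ** n
--     out = rec(total, n)
--     return [carry] + out if carry else out
-- ===== Notes on version B (the rewrite author's own statement) =====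
-- stated objective: alternative
-- what changed: B never runs A's per-digit multiply-with-carry loop: it folds the whole digit list into one integer (Horner), multiplies once as a big integer, and recovers the fixed-width digit list (plus a possible carry) from the product by divide-and-conquer base-10 splitting.
import Mathlib
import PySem

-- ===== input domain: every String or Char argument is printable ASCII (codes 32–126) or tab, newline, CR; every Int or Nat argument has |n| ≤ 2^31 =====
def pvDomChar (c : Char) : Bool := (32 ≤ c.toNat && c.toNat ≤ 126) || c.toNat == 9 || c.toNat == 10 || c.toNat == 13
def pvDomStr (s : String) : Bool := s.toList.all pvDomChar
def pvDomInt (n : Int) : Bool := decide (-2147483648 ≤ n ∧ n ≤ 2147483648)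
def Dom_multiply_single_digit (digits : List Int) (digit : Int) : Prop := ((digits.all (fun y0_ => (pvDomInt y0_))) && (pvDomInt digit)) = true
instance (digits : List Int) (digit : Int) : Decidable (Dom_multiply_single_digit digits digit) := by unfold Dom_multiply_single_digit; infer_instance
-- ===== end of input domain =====

-- B never multiplies digit by digit: it folds the digit list into one integer (Horner), multiplies
-- once, and extracts len(digits) base-10 digits (plus a possible carry) from the product by
-- divide-and-conquer splitting (objective: alternative algorithm, not claimed faster).

-- ===== PORT A =====
-- the while loop of A: fuel k means idx = k-1; processes indices k-1, k-2, …, 0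
def mulLoopA (digits : List Int) (digit : Int) : Nat → Int → List Int → Int × List Int
  | 0, carry, result => (carry, result)
  | k+1, carry, result =>
    let prod := digits.getD k 0 * digit + carry
    mulLoopA digits digit k (PySem.Int.floordiv prod 10) (result ++ [PySem.Int.mod prod 10])

def multiply_single_digit (digits : List Int) (digit : Int) : List Int :=
  if digits = [0] ∨ digit = 0 then [0] else
  let n := digits.length
  let cr := mulLoopA digits digit n 0 []
  let result := if cr.1 ≠ 0 then cr.2 ++ [cr.1] else cr.2
  result.reverse

-- ===== PORT B =====
-- B's rec: big-endian list of the m lowest base-10 digits of t, by divide and conquer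
def recB : Nat → Int → List Int
  | 0, _ => []
  | 1, t => [PySem.Int.mod t 10]
  | m+2, t =>
    recB ((m+2) - (m+2)/2) (PySem.Int.floordiv t (10 ^ ((m+2)/2))) ++
    recB ((m+2)/2) (PySem.Int.mod t (10 ^ ((m+2)/2)))
termination_by m _ => m
decreasing_by all_goals omega

def multiply_single_digit_alt (digits : List Int) (digit : Int) : List Int :=
  if digits = [0] ∨ digit = 0 then [0] else
  let n := digits.length
  let val := digits.foldl (fun v d => v * 10 + d) 0
  let total := val * digit
  let carry := PySem.Int.floordiv total (10 ^ n)
  let out := recB n total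
  if carry ≠ 0 then carry :: out else out

-- ===== PRECONDITION & SPEC =====
def Spec_multiply_single_digit (digits : List Int) (digit : Int) (out : List Int) : Prop := out = multiply_single_digit_alt digits digit
instance (digits : List Int) (digit : Int) (out : List Int) : Decidable (Spec_multiply_single_digit digits digit out) := by unfold Spec_multiply_single_digit; infer_instance

-- ===== CLAIM (what is proved, stated in full; the proofs are below) =====
def Claim_equal_multiply_single_digit : Prop := ∀ (digits : List Int) (digit : Int), Dom_multiply_single_digit digits digit → Spec_multiply_single_digit digits digit (multiply_single_digit digits digit)

-- ===== LEMMAS AND PROOFS =====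

-- invariant of A's loop: with t = (value of the first k digits)*digit + incoming carry,
-- the loop returns carry t/10^k and appends the digits t/10^e % 10 for e = 0,…,k-1 (little-endian)
lemma mulLoopA_spec (digits : List Int) (digit : Int) :
    ∀ (k : Nat), k ≤ digits.length → ∀ (c : Int) (res : List Int),
      mulLoopA digits digit k c res =
        (((digits.take k).foldl (fun v d => v * 10 + d) 0 * digit + c) / (10 ^ k : Int),
         res ++ (List.range k).map (fun e =>
           (((digits.take k).foldl (fun v d => v * 10 + d) 0 * digit + c) / (10 ^ e : Int)) % 10)) := by
  intro k
  induction k with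
  | zero => intro _ c res; simp [mulLoopA]
  | succ k ih =>
    intro hk c res
    have hk' : k < digits.length := by omega
    have hget : digits.getD k 0 = digits[k] := List.getD_eq_getElem digits 0 hk'
    have htake : digits.take (k+1) = digits.take k ++ [digits[k]] := by
      rw [List.take_add_one]; simp [List.getElem?_eq_getElem hk']
    set H := (digits.take k).foldl (fun v d => v * 10 + d) 0 with hH
    have hfold : (digits.take (k+1)).foldl (fun v d => v * 10 + d) 0 = H * 10 + digits[k] := by
      rw [htake, List.foldl_append]; simp [hH]
    set p : Int := digits[k] * digit + c with hp
    set t : Int := (digits.take (k+1)).foldl (fun v d => v * 10 + d) 0 * digit + c with ht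
    have htp : t = p + H * digit * 10 := by rw [ht, hfold, hp]; ring
    have hfd : PySem.Int.floordiv p 10 = p / 10 :=
      PySem.Int.floordiv_eq_ediv_of_pos (by norm_num)
    have hmd : PySem.Int.mod p 10 = p % 10 :=
      PySem.Int.mod_eq_emod_of_pos (by norm_num)
    have ht10 : t / 10 = H * digit + p / 10 := by
      rw [htp, Int.add_mul_ediv_right _ _ (by norm_num : (10:Int) ≠ 0)]; ring
    have htm : t % 10 = p % 10 := by rw [htp]; simp [Int.add_mul_emod_self_right]
    show mulLoopA digits digit (k+1) c res = _
    rw [mulLoopA, ih (by omega) (PySem.Int.floordiv (digits.getD k 0 * digit + c) 10)]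
    rw [hget, ← hp, hfd, ← ht10]
    congr 1
    · -- carries agree: (t/10)/10^k = t/10^(k+1)
      rw [Int.ediv_ediv_of_nonneg (by norm_num)]
      norm_num [pow_succ, mul_comm]
    · -- digit lists agree
      rw [List.range_succ_eq_map, List.map_cons, List.map_map]
      simp only [pow_zero, Int.ediv_one, htm, hmd, List.append_assoc, List.singleton_append]
      congr 1
      refine congrArg₂ List.cons rfl ?_
      apply List.map_congr_left
      intro e _
      simp only [Function.comp]
      rw [Int.ediv_ediv_of_nonneg (by norm_num : (0:Int) ≤ 10)]
      congr 2
      rw [pow_succ]; ring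

-- a digit below the split point is unchanged by taking t % 10^h
lemma low_digit_of_emod (t : Int) (h e : Nat) (he : e < h) :
    (t % (10 ^ h : Int)) / (10 ^ e : Int) % 10 = t / (10 ^ e : Int) % 10 := by
  conv_rhs => rw [← Int.emod_add_mul_ediv t (10 ^ h)]
  have hsplit : (10 ^ h : Int) = 10 ^ e * 10 ^ (h - e) := by
    rw [← pow_add]; congr 1; omega
  have h1 : t % (10 ^ h : Int) + 10 ^ h * (t / 10 ^ h)
      = t % (10 ^ h : Int) + (t / 10 ^ h * 10 ^ (h - e)) * 10 ^ e := by
    rw [hsplit]; ring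
  rw [h1, Int.add_mul_ediv_right _ _ (by positivity : (10 ^ e : Int) ≠ 0)]
  have h2 : (t / (10 ^ h : Int) * 10 ^ (h - e))
      = (t / (10 ^ h : Int) * 10 ^ (h - e - 1)) * 10 := by
    have : (10 ^ (h - e) : Int) = 10 ^ (h - e - 1) * 10 := by
      rw [← pow_succ]; congr 1; omega
    rw [this]; ring
  rw [h2, Int.add_mul_emod_self_right]

-- recB m t lists the digits t / 10^(m-1-i) % 10 for i = 0, …, m-1 (big-endian)
lemma recB_spec : ∀ (m : Nat) (t : Int),
    recB m t = (List.range m).map (fun i => t / (10 ^ (m - 1 - i) : Int) % 10) := by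
  intro m
  induction m using Nat.strong_induction_on with
  | _ m ih =>
    match m with
    | 0 => intro t; simp [recB]
    | 1 =>
      intro t
      simp [recB]
    | (m+2) =>
      intro t
      rw [recB, ih ((m+2) - (m+2)/2) (by omega), ih ((m+2)/2) (by omega)]
      set M := m + 2 with hM
      set h := M / 2 with hh
      have hfd : PySem.Int.floordiv t (10 ^ h) = t / (10 ^ h : Int) :=
        PySem.Int.floordiv_eq_ediv_of_pos (by positivity)
      have hmd : PySem.Int.mod t (10 ^ h) = t % (10 ^ h : Int) :=
        PySem.Int.mod_eq_emod_of_pos (by positivity)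
      rw [hfd, hmd]
      apply List.ext_getElem
      · simp; omega
      · intro i hi1 hi2
        simp only [List.length_map, List.length_range] at hi1 hi2
        by_cases hcase : i < M - h
        · rw [List.getElem_append_left (by simp; omega)]
          simp only [List.getElem_map, List.getElem_range]
          rw [Int.ediv_ediv_of_nonneg (by positivity), ← pow_add]
          congr 3
          omega
        · rw [List.getElem_append_right (by simp; omega)]
          simp only [List.getElem_map, List.getElem_range, List.length_map, List.length_range]
          rw [low_digit_of_emod t h (h - 1 - (i - (M - h))) (by omega)]
          congr 3
          omega

-- reversing a map over range n replaces index i by n-1-i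
lemma reverse_map_range (n : Nat) (g : Nat → Int) :
    ((List.range n).map g).reverse = (List.range n).map (fun i => g (n - 1 - i)) := by
  apply List.ext_getElem
  · simp
  · intro i h1 h2
    simp only [List.getElem_reverse, List.getElem_map, List.length_map,
      List.length_range, List.getElem_range]

-- ===== VERDICT (by name: the statement is the Claim_ definition above) =====
theorem multiply_single_digit_spec : Claim_equal_multiply_single_digit := by
  intro digits digit _
  unfold Spec_multiply_single_digit multiply_single_digit multiply_single_digit_alt
  by_cases hg : digits = [0] ∨ digit = 0
  · simp [hg]
  · simp only [hg, if_false]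
    rw [mulLoopA_spec digits digit digits.length (le_refl _) 0 [],
        recB_spec digits.length (digits.foldl (fun v d => v * 10 + d) 0 * digit)]
    simp only [List.take_length, add_zero, List.nil_append]
    set n := digits.length
    set total := digits.foldl (fun v d => v * 10 + d) 0 * digit with htot
    have hc : PySem.Int.floordiv total (10 ^ n) = total / (10 ^ n : Int) :=
      PySem.Int.floordiv_eq_ediv_of_pos (by positivity)
    rw [hc]
    by_cases hcz : total / (10 ^ n : Int) = 0
    · simp only [hcz, ne_eq, not_true_eq_false, if_false]
      exact reverse_map_range n _
    · simp only [hcz, ne_eq, not_false_eq_true, if_true]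
      rw [List.reverse_append]
      simp only [List.reverse_singleton, List.singleton_append]
      rw [reverse_map_range n _]
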